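-- pv_equiv track=rewrite | github.com/Satyam-2001/My-Codes | Facebook/Round 2/B.py | recurse
-- ===== SOURCE A (Python) =====
-- def recurse(N,dp):
--
--     if dp[N]!=None:
--         return dp
--     if N%2!=0:
--         dp = recurse(N-1,dp)
--         dp[N] = not dp[N-1]
--     elif N%4 == 0:
--         dp[N] = True
--     else :
--         dp = recurse(N//2,dp)
--         dp[N] = not dp[N//2]
--     return dp
-- ===== SOURCE B (Python) =====
-- # Iterative re-implementation: descend building an explicit path, then fill cells
-- # bottom-up.  Mutates dp in place and returns it, like the original.
-- def recurse(N, dp):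
--     path = []
--     i = N
--     while dp[i] is None:
--         path.append(i)
--         if i % 2 != 0:
--             i -= 1
--         elif i % 4 != 0:
--             i //= 2
--         else:
--             break
--     for j in reversed(path):
--         if j % 2 != 0:
--             dp[j] = not dp[j - 1]
--         elif j % 4 != 0:
--             dp[j] = not dp[j // 2]
--         else:
--             dp[j] = True
--     return dp
-- ===== Notes on version B (the rewrite author's own statement) =====
-- stated objective: alternative
-- what changed: Replaced the memoized recursion by an iterative two-phase algorithm: a loop descends from N collecting the visited indices on an explicit path list, then a second loop fills exactly those cells bottom-up; no recursion.
import Mathlib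
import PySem

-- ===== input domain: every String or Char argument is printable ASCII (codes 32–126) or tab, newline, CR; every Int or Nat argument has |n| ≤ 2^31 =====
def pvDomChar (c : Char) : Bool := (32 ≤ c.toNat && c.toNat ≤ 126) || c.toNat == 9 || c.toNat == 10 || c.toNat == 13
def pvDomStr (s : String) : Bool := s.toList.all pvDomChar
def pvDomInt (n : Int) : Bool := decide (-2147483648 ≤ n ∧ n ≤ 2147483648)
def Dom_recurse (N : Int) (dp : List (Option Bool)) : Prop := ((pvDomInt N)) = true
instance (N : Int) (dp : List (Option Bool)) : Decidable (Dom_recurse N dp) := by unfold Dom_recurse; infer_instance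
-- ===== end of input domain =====

-- B replaces the memoized recursion by an explicit descend-then-fill iteration (alternative
-- decomposition, same cost).  Both Pythons mutate dp in place and return the same object;
-- the equivalence proved here is about the returned list value.

-- ===== PORT A =====
-- Python `not dp[k]` where dp[k] is None/True/False
def pyNotOpt (o : Option Bool) : Bool := match o with | none => true | some b => !b

-- A is recursive with no structural decreasing argument (it diverges for e.g. N = -1),
-- so the port carries a fuel; fuel N.toNat + 1 covers every input admitted by Pre_recurse
-- (the chain N → N-1 / N//2 is strictly decreasing and nonnegative there).
-- Reads `dp[N-1]`/`dp[N//2]` after the recursive call use pyGetD with default none;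
-- inside Pre_recurse those indices are in range, so this totalization is exact there.
def recurseFuel : Nat → Int → List (Option Bool) → List (Option Bool)
  | 0, _, dp => dp
  | fuel+1, N, dp =>
    match PySem.List.pyGet? dp N with
    | none => dp   -- IndexError: outside Pre_recurse
    | some cell =>
      if cell ≠ none then dp
      else if PySem.Int.mod N 2 ≠ 0 then
        let dp' := recurseFuel fuel (N - 1) dp
        PySem.List.pySetD dp' N (some (pyNotOpt (PySem.List.pyGetD dp' (N - 1) none)))
      else if PySem.Int.mod N 4 = 0 then
        PySem.List.pySetD dp N (some true)
      else
        let dp' := recurseFuel fuel (PySem.Int.floordiv N 2) dp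
        PySem.List.pySetD dp' N (some (pyNotOpt (PySem.List.pyGetD dp' (PySem.Int.floordiv N 2) none)))

def recurse (N : Int) (dp : List (Option Bool)) : List (Option Bool) :=
  recurseFuel (N.toNat + 1) N dp

-- ===== PORT B =====
-- phase 1 of Source B: the while loop collecting the visited indices (dp is not modified here);
-- the while loop gets the same fuel as A's recursion, sufficient inside Pre_recurse.
def recurseDescend : Nat → Int → List (Option Bool) → List Int
  | 0, _, _ => []
  | fuel+1, i, dp =>
    match PySem.List.pyGet? dp i with
    | none => []          -- IndexError: outside Pre_recurse
    | some (some _) => []  -- memo cell already set: loop stops, nothing appended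
    | some none =>
      if PySem.Int.mod i 2 ≠ 0 then i :: recurseDescend fuel (i - 1) dp
      else if PySem.Int.mod i 4 ≠ 0 then i :: recurseDescend fuel (PySem.Int.floordiv i 2) dp
      else [i]

-- one iteration of phase 2 of Source B: the assignment to dp[j]
def recurseAssign (dp : List (Option Bool)) (j : Int) : List (Option Bool) :=
  if PySem.Int.mod j 2 ≠ 0 then
    PySem.List.pySetD dp j (some (pyNotOpt (PySem.List.pyGetD dp (j - 1) none)))
  else if PySem.Int.mod j 4 ≠ 0 then
    PySem.List.pySetD dp j (some (pyNotOpt (PySem.List.pyGetD dp (PySem.Int.floordiv j 2) none)))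
  else
    PySem.List.pySetD dp j (some true)

-- `for j in reversed(path)` = foldr over path in push order
def recurse_alt (N : Int) (dp : List (Option Bool)) : List (Option Bool) :=
  (recurseDescend (N.toNat + 1) N dp).foldr (fun j acc => recurseAssign acc j) dp

-- ===== PRECONDITION & SPEC =====
-- Pre_ excludes out-of-range N (A raises IndexError) and negative in-range N whose memo
-- cell is unset: there A either recurses forever (RecursionError, e.g. N = -1) or fills
-- cells through Python's accidental negative-index wraparound — an artefact of A's
-- implementation (B happens to behave identically there, but it is no one's intent).
def Pre_recurse (N : Int) (dp : List (Option Bool)) : Prop :=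
  (0 ≤ N ∧ N < dp.length) ∨
  (-(dp.length : Int) ≤ N ∧ N < 0 ∧ PySem.List.pyGet? dp N ≠ some none)
instance (N : Int) (dp : List (Option Bool)) : Decidable (Pre_recurse N dp) := by
  unfold Pre_recurse; infer_instance

def pvWitness_recurse : Int × List (Option Bool) := (2, [none, none, none])

def Spec_recurse (N : Int) (dp : List (Option Bool)) (out : List (Option Bool)) : Prop :=
  out = recurse_alt N dp
instance (N : Int) (dp : List (Option Bool)) (out : List (Option Bool)) :
    Decidable (Spec_recurse N dp out) := by unfold Spec_recurse; infer_instance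

-- ===== CLAIM (what is proved, stated in full; the proofs are below) =====
def Claim_equal_recurse : Prop :=
  ∀ (N : Int) (dp : List (Option Bool)), Dom_recurse N dp → Pre_recurse N dp →
    Spec_recurse N dp (recurse N dp)

-- ===== LEMMAS AND PROOFS =====

-- The heart of the proof: with the same fuel, A's recursion computes exactly the
-- fold of B's assignment over B's descent path (for ALL inputs, Pre_ not needed).
theorem recurseFuel_eq_foldr (fuel : Nat) :
    ∀ (N : Int) (dp : List (Option Bool)),
      recurseFuel fuel N dp
        = (recurseDescend fuel N dp).foldr (fun j acc => recurseAssign acc j) dp := by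
  induction fuel with
  | zero => intro N dp; rfl
  | succ f ih =>
    intro N dp
    simp only [recurseFuel, recurseDescend]
    cases h : PySem.List.pyGet? dp N with
    | none => rfl
    | some cell =>
      cases cell with
      | some b => simp
      | none =>
        simp only [ne_eq, not_true_eq_false, if_false]
        by_cases h2 : PySem.Int.mod N 2 ≠ 0
        · rw [if_pos h2, if_pos h2, List.foldr_cons]
          show _ = recurseAssign _ N
          rw [← ih]
          unfold recurseAssign
          rw [if_pos h2]
        · rw [if_neg h2, if_neg h2]
          by_cases h4 : PySem.Int.mod N 4 = 0
          · rw [if_pos h4, if_neg (by simpa using h4), List.foldr_cons, List.foldr_nil]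
            show _ = recurseAssign dp N
            unfold recurseAssign
            rw [if_neg h2, if_neg (by simpa using h4)]
          · rw [if_neg h4, if_pos h4, List.foldr_cons]
            show _ = recurseAssign _ N
            rw [← ih]
            unfold recurseAssign
            rw [if_neg h2, if_pos h4]

-- ===== VERDICT (by name: the statement is the Claim_ definition above) =====
theorem recurse_spec : Claim_equal_recurse := by
  intro N dp _ _
  unfold Spec_recurse recurse recurse_alt
  exact recurseFuel_eq_foldr _ N dp
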